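-- pv_equiv track=rewrite | github.com/XED-dev/TUI | src/xed_tui/xed_tui_v1.py | wrap_spans
-- ===== SOURCE A (Python) =====
-- def wrap_spans(spans: list[tuple[str, str]], width: int) -> list[list[tuple[str, str]]]:
--     """Bricht Span-Liste span-bewusst an Wortgrenzen — kein Markdown-Marker wird gespalten."""
--     lines: list[list[tuple[str, str]]] = [[]]
--     col = 0
--     for kind, seg in spans:
--         for wi, word in enumerate(seg.split(' ')):
--             if wi > 0 and col > 0:                       # Leerzeichen zwischen Wörtern
--                 cur = lines[-1]
--                 if cur and cur[-1][0] == kind: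
--                     cur[-1] = (kind, cur[-1][1] + ' ')
--                 else:
--                     cur.append((kind, ' '))
--                 col += 1
--             if not word:
--                 continue
--             if col + len(word) > width and col > 0:       # Zeilenumbruch
--                 lines.append([])
--                 col = 0
--             cur = lines[-1]
--             if cur and cur[-1][0] == kind:
--                 cur[-1] = (kind, cur[-1][1] + word)
--             else:
--                 cur.append((kind, word))
--             col += len(word)
--     return [line for line in lines if line]
-- ===== SOURCE B (Python) =====
-- def wrap_spans(spans: list[tuple[str, str]], width: int) -> list[list[tuple[str, str]]]:
--     """Span-aware word wrap: pack atomic (kind, text) pieces greedily, then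
--     coalesce same-kind runs per line in a separate right-to-left pass."""
--     packed: list[list[tuple[str, str]]] = [[]]
--     col = 0
--     for kind, seg in spans:
--         for wi, word in enumerate(seg.split(' ')):
--             if wi > 0 and col > 0:
--                 packed[-1].append((kind, ' '))
--                 col += 1
--             if not word:
--                 continue
--             if col + len(word) > width and col > 0:
--                 packed.append([])
--                 col = 0
--             packed[-1].append((kind, word))
--             col += len(word)
--     out: list[list[tuple[str, str]]] = []
--     for line in packed:
--         merged: list[tuple[str, str]] = []
--         for kind, text in reversed(line):
--             if merged and merged[0][0] == kind:
--                 merged[0] = (kind, text + merged[0][1])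
--             else:
--                 merged.insert(0, (kind, text))
--         if merged:
--             out.append(merged)
--     return out
-- ===== Notes on version B (the rewrite author's own statement) =====
-- stated objective: alternative
-- what changed: B separates concerns into two differently shaped passes: a greedy packing loop that appends every word and inter-word space as its own atomic (kind,text) tuple, followed by a right-to-left coalescing pass that merges consecutive same-kind tuples per line and drops empty lines, whereas A merges each piece inline into the tail of the current line while packing.
import Mathlib
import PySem

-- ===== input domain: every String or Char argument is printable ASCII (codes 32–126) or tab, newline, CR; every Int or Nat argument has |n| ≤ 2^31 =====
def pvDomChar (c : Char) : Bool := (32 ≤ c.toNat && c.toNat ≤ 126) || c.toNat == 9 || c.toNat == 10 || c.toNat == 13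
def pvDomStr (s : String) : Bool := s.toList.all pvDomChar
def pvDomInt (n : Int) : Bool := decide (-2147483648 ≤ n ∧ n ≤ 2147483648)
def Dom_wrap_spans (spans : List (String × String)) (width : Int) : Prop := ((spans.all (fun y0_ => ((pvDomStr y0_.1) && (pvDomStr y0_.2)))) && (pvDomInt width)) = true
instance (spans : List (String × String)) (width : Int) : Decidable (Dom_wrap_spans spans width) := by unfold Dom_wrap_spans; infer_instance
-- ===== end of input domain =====

-- B separates packing from run-merging: it packs atomic (kind,text) pieces, then
-- coalesces same-kind runs in a second right-to-left pass (objective: alternative).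


-- ===== PORT A =====
-- seg.split(' ')  (PySem.Chars.splitOn is exact for a nonempty separator)
def pySplitSpace (s : String) : List String :=
  (PySem.Chars.splitOn s.toList [' ']).map String.ofList

-- `if cur and cur[-1][0] == kind: cur[-1] = (kind, cur[-1][1] + text) else: cur.append((kind, text))`
def mergePush (kind text : String) (cur : List (String × String)) : List (String × String) :=
  match cur.getLast? with
  | some last => if last.1 == kind then cur.dropLast ++ [(kind, last.2 ++ text)]
                 else cur ++ [(kind, text)]
  | none => cur ++ [(kind, text)]

-- one iteration of the inner `for wi, word in enumerate(seg.split(' '))` loop of A;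
-- state = (lines[:-1], lines[-1], col)
def wrapStepA (kind : String) (width : Int)
    (st : List (List (String × String)) × List (String × String) × Int)
    (iw : Int × String) : List (List (String × String)) × List (String × String) × Int :=
  let s1 := if iw.1 > 0 ∧ st.2.2 > 0 then (st.1, mergePush kind " " st.2.1, st.2.2 + 1) else st
  if iw.2 == "" then s1
  else
    let s2 := if s1.2.2 + (PySem.Str.len iw.2 : Int) > width ∧ s1.2.2 > 0
              then (s1.1 ++ [s1.2.1], ([] : List (String × String)), (0 : Int)) else s1
    (s2.1, mergePush kind iw.2 s2.2.1, s2.2.2 + (PySem.Str.len iw.2 : Int))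

def wrap_spans (spans : List (String × String)) (width : Int) : List (List (String × String)) :=
  let st := spans.foldl
    (fun st kv => (PySem.List.enumerate (pySplitSpace kv.2)).foldl (wrapStepA kv.1 width) st)
    ([], [], 0)
  (st.1 ++ [st.2.1]).filter (fun l => !l.isEmpty)

-- ===== PORT B =====
-- one iteration of B's packing loop: every word / inter-word space is appended as its own atom
def wrapStepB (kind : String) (width : Int)
    (st : List (List (String × String)) × List (String × String) × Int)
    (iw : Int × String) : List (List (String × String)) × List (String × String) × Int :=
  let s1 := if iw.1 > 0 ∧ st.2.2 > 0 then (st.1, st.2.1 ++ [(kind, " ")], st.2.2 + 1) else st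
  if iw.2 == "" then s1
  else
    let s2 := if s1.2.2 + (PySem.Str.len iw.2 : Int) > width ∧ s1.2.2 > 0
              then (s1.1 ++ [s1.2.1], ([] : List (String × String)), (0 : Int)) else s1
    (s2.1, s2.2.1 ++ [(kind, iw.2)], s2.2.2 + (PySem.Str.len iw.2 : Int))

-- B's right-to-left coalescing pass: `for kind, text in reversed(line): merge into merged[0] or insert at front`
def consStep (p : String × String) (acc : List (String × String)) : List (String × String) :=
  match acc with
  | [] => [p]
  | q :: out => if p.1 == q.1 then (p.1, p.2 ++ q.2) :: out else p :: q :: out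

def coalesce : List (String × String) → List (String × String)
  | [] => []
  | p :: rest => consStep p (coalesce rest)

def wrap_spans_alt (spans : List (String × String)) (width : Int) : List (List (String × String)) :=
  let st := spans.foldl
    (fun st kv => (PySem.List.enumerate (pySplitSpace kv.2)).foldl (wrapStepB kv.1 width) st)
    ([], [], 0)
  (((st.1 ++ [st.2.1]).map coalesce)).filter (fun l => !l.isEmpty)

-- ===== PRECONDITION & SPEC =====
def Spec_wrap_spans (spans : List (String × String)) (width : Int) (out : List (List (String × String))) : Prop := out = wrap_spans_alt spans width
instance (spans : List (String × String)) (width : Int) (out : List (List (String × String))) : Decidable (Spec_wrap_spans spans width out) := by unfold Spec_wrap_spans; infer_instance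

-- ===== CLAIM (what is proved, stated in full; the proofs are below) =====
def Claim_equal_wrap_spans : Prop := ∀ (spans : List (String × String)) (width : Int), Dom_wrap_spans spans width → Spec_wrap_spans spans width (wrap_spans spans width)

-- ===== LEMMAS AND PROOFS =====

-- relates A's merged state to B's atomic state
def simState (st : List (List (String × String)) × List (String × String) × Int) :
    List (List (String × String)) × List (String × String) × Int :=
  (st.1.map coalesce, coalesce st.2.1, st.2.2)

theorem mergePush_cons (k t : String) (b c : String × String) (M : List (String × String)) :
    mergePush k t (b :: c :: M) = b :: mergePush k t (c :: M) := by
  simp only [mergePush, List.getLast?_cons_cons]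
  split <;> first | (split <;> simp) | simp

theorem consStep_mergePush (a : String × String) (k t : String) (L : List (String × String)) :
    consStep a (mergePush k t L) = mergePush k t (consStep a L) := by
  match L with
  | [] =>
    simp [mergePush, consStep]
    split <;> simp_all
  | [b] =>
    simp only [mergePush, consStep, List.getLast?_singleton]
    by_cases h1 : b.1 = k <;> by_cases h2 : a.1 = b.1 <;>
      simp_all [String.append_assoc]
  | b :: c :: M =>
    obtain ⟨m, ms, hM⟩ : ∃ m ms, mergePush k t (c :: M) = m :: ms := by
      cases h : mergePush k t (c :: M) with
      | nil =>
        exfalso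
        simp only [mergePush] at h
        cases hL : (c :: M).getLast? <;> simp [hL] at h
        split at h <;> simp at h
      | cons m ms => exact ⟨m, ms, rfl⟩
    by_cases h2 : a.1 = b.1
    · have e1 : consStep a (b :: c :: M) = (a.1, a.2 ++ b.2) :: c :: M := by
        simp [consStep, h2]
      rw [e1, mergePush_cons, mergePush_cons, hM]
      simp [consStep, h2]
    · have e1 : consStep a (b :: c :: M) = a :: b :: c :: M := by
        simp [consStep, h2]
      rw [e1, mergePush_cons, mergePush_cons (b := a), mergePush_cons, hM]
      simp [consStep, h2]

theorem coalesce_snoc (xs : List (String × String)) (k t : String) :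
    coalesce (xs ++ [(k, t)]) = mergePush k t (coalesce xs) := by
  induction xs with
  | nil => simp [coalesce, consStep, mergePush]
  | cons p xs ih =>
    simp only [List.cons_append, coalesce, ih]
    exact consStep_mergePush p k t (coalesce xs)

theorem stepAB (kind : String) (width : Int)
    (st : List (List (String × String)) × List (String × String) × Int) (iw : Int × String) :
    wrapStepA kind width (simState st) iw = simState (wrapStepB kind width st iw) := by
  obtain ⟨pb, cb, col⟩ := st
  simp only [wrapStepA, wrapStepB, simState]
  by_cases h1 : iw.1 > 0 ∧ col > 0 <;>
    by_cases h2 : iw.2 == "" <;>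
    simp [h1, h2, coalesce_snoc] <;>
    split_ifs <;>
    simp_all [coalesce_snoc, coalesce]

theorem innerAB (width : Int) (kv : String × String) :
    ∀ (l : List (Int × String)) (b : List (List (String × String)) × List (String × String) × Int),
      l.foldl (wrapStepA kv.1 width) (simState b) = simState (l.foldl (wrapStepB kv.1 width) b) := by
  intro l
  induction l with
  | nil => intro b; rfl
  | cons c l ih => intro b; simp only [List.foldl_cons, stepAB, ih]

theorem spansAB (width : Int) :
    ∀ (spans : List (String × String)) (b : List (List (String × String)) × List (String × String) × Int),
      spans.foldl (fun st kv => (PySem.List.enumerate (pySplitSpace kv.2)).foldl (wrapStepA kv.1 width) st) (simState b)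
      = simState (spans.foldl (fun st kv => (PySem.List.enumerate (pySplitSpace kv.2)).foldl (wrapStepB kv.1 width) st) b) := by
  intro spans
  induction spans with
  | nil => intro b; rfl
  | cons kv l ih =>
    intro b
    rw [List.foldl_cons, List.foldl_cons, innerAB, ih]

-- ===== VERDICT (by name: the statement is the Claim_ definition above) =====
theorem wrap_spans_spec : Claim_equal_wrap_spans := by
  intro spans width _                                          -- Dom is not needed
  unfold Spec_wrap_spans
  simp only [wrap_spans, wrap_spans_alt]
  have key : spans.foldl
      (fun st kv => (PySem.List.enumerate (pySplitSpace kv.2)).foldl (wrapStepA kv.1 width) st)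
      ([], [], 0)
    = simState (spans.foldl
      (fun st kv => (PySem.List.enumerate (pySplitSpace kv.2)).foldl (wrapStepB kv.1 width) st)
      ([], [], 0)) := by
    conv_lhs => rw [show (([], [], 0) : List (List (String × String)) × List (String × String) × Int)
      = simState ([], [], 0) from rfl]
    exact spansAB width spans ([], [], 0)
  rw [key]
  obtain ⟨p, c, col⟩ := spans.foldl
      (fun st kv => (PySem.List.enumerate (pySplitSpace kv.2)).foldl (wrapStepB kv.1 width) st)
      ([], [], 0)
  simp [simState]
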